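-- pv_equiv track=rewrite | github.com/OpenAccessBC/openparliamentBC | parliament/hansards/models.py | _topics
-- ===== SOURCE A (Python) =====
-- def _topics(lst):
--     topics = []
--     last_topic = ''
--     for statement in lst:
--         if statement[0] and statement[0] != last_topic:
--             last_topic = statement[0]
--             topics.append((statement[0], statement[1]))
--     return topics
-- ===== SOURCE B (Python) =====
-- def _topics(lst):
--     filtered = [s for s in lst if s[0]]
--     out = []
--     i = 0
--     n = len(filtered)
--     while i < n:
--         topic = filtered[i][0]
--         out.append((topic, filtered[i][1]))
--         while i < n and filtered[i][0] == topic: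
--             i += 1
--     return out
-- ===== Notes on version B (the rewrite author's own statement) =====
-- stated objective: alternative
-- what changed: B first filters out statements with empty topic, then walks the filtered list as runs of equal consecutive topics, emitting the first statement of each run, instead of A's single pass with a last_topic accumulator.
import Mathlib
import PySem

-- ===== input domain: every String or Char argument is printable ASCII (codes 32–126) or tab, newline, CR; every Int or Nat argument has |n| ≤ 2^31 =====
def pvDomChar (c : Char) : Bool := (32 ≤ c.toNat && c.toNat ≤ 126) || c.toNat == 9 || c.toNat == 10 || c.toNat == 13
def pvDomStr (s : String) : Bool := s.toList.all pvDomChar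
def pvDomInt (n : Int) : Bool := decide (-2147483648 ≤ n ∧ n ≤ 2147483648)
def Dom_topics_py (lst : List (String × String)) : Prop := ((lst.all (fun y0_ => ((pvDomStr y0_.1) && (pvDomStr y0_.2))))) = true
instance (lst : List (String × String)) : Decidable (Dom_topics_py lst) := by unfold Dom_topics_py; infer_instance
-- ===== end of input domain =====

-- B groups the filtered statements into runs of equal consecutive topics and emits the
-- first statement of each run, instead of A's single pass with a last_topic accumulator.

-- ===== PORT A =====
-- the for-loop of _topics: state = (last_topic, accumulated topics)
def topicsLoop : List (String × String) → String → List (String × String) → List (String × String)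
  | [], _, acc => acc
  | s :: rest, last, acc =>
    if s.1 ≠ "" ∧ s.1 ≠ last then topicsLoop rest s.1 (acc ++ [(s.1, s.2)])
    else topicsLoop rest last acc

def topics_py (lst : List (String × String)) : List (String × String) :=
  topicsLoop lst "" []

-- ===== PORT B =====
-- the outer while-loop of Source B: emit head of a run, then skip the whole run
def topicsRuns : List (String × String) → List (String × String)
  | [] => []
  | s :: rest => (s.1, s.2) :: topicsRuns (rest.dropWhile (fun t => t.1 == s.1))
termination_by l => l.length
decreasing_by
  have := List.length_dropWhile_le (fun t : String × String => t.1 == s.1) rest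
  simp; omega

def topics_py_alt (lst : List (String × String)) : List (String × String) :=
  topicsRuns (lst.filter (fun s => decide (s.1 ≠ "")))

-- ===== PRECONDITION & SPEC =====
def Spec_topics_py (lst : List (String × String)) (out : List (String × String)) : Prop := out = topics_py_alt lst
instance (lst : List (String × String)) (out : List (String × String)) : Decidable (Spec_topics_py lst out) := by unfold Spec_topics_py; infer_instance

-- ===== CLAIM (what is proved, stated in full; the proofs are below) =====
def Claim_equal_topics_py : Prop := ∀ (lst : List (String × String)), Dom_topics_py lst → Spec_topics_py lst (topics_py lst)

-- ===== LEMMAS AND PROOFS =====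

-- proof-side reference function: A's loop result as a function of the pending list and last topic
def topicsG : String → List (String × String) → List (String × String)
  | _, [] => []
  | last, s :: rest =>
    if s.1 = last then topicsG last rest else (s.1, s.2) :: topicsG s.1 rest

theorem topicsLoop_acc (lst : List (String × String)) :
    ∀ (last : String) (acc : List (String × String)),
      topicsLoop lst last acc = acc ++ topicsLoop lst last [] := by
  induction lst with
  | nil => intro last acc; simp [topicsLoop]
  | cons s rest ih =>
    intro last acc
    by_cases h : s.1 ≠ "" ∧ s.1 ≠ last
    · simp only [topicsLoop, if_pos h]
      rw [ih s.1 (acc ++ [(s.1, s.2)]), ih s.1 ([] ++ [(s.1, s.2)])]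
      simp
    · simp only [topicsLoop, if_neg h]
      exact ih last acc

theorem topicsLoop_eq_G (lst : List (String × String)) :
    ∀ last : String,
      topicsLoop lst last [] = topicsG last (lst.filter (fun s => decide (s.1 ≠ ""))) := by
  induction lst with
  | nil => intro last; simp [topicsLoop, topicsG]
  | cons s rest ih =>
    intro last
    by_cases he : s.1 = ""
    · simp only [topicsLoop]
      rw [if_neg (by simp [he]), List.filter_cons, if_neg (by simp [he])]
      exact ih last
    · by_cases hl : s.1 = last
      · simp only [topicsLoop]
        rw [if_neg (by simp [hl]), List.filter_cons, if_pos (by simp [he])]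
        simp only [topicsG, if_pos hl]
        exact ih last
      · simp only [topicsLoop]
        rw [if_pos ⟨he, hl⟩, List.filter_cons, if_pos (by simp [he])]
        simp only [topicsG, if_neg hl, List.nil_append]
        rw [topicsLoop_acc, ih s.1]
        simp

theorem topicsRuns_dropWhile_eq_G (l : List (String × String)) :
    ∀ k : String, topicsRuns (l.dropWhile (fun t => t.1 == k)) = topicsG k l := by
  induction l with
  | nil => intro k; simp [topicsRuns, topicsG]
  | cons s rest ih =>
    intro k
    by_cases h : s.1 = k
    · rw [List.dropWhile_cons, if_pos (by simp [h])]
      simp only [topicsG, if_pos h]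
      exact ih k
    · rw [List.dropWhile_cons, if_neg (by simp [h])]
      simp only [topicsG, if_neg h, topicsRuns]
      rw [ih s.1]

theorem dropWhile_filter_empty (l : List (String × String)) :
    (l.filter (fun s => decide (s.1 ≠ ""))).dropWhile (fun t => t.1 == "") =
      l.filter (fun s => decide (s.1 ≠ "")) := by
  induction l with
  | nil => simp
  | cons s rest ih =>
    by_cases h : s.1 = ""
    · rw [List.filter_cons, if_neg (by simp [h])]
      exact ih
    · rw [List.filter_cons, if_pos (by simp [h]), List.dropWhile_cons, if_neg (by simp [h])]

-- ===== VERDICT (by name: the statement is the Claim_ definition above) =====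
theorem topics_py_spec : Claim_equal_topics_py := by
  intro lst _
  unfold Spec_topics_py topics_py topics_py_alt
  rw [topicsLoop_eq_G, ← topicsRuns_dropWhile_eq_G, dropWhile_filter_empty]
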